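-- pv_equiv track=rewrite | github.com/kirilligum/cdips-fire | onehot.py | col_to_list
-- ===== SOURCE A (Python) =====
-- def col_to_list(dv):
--     rdv = list(dv)
--     enum = list(set(dv))
--     enum.sort() #set is unordered; could lead to problems of column mismatch later, so best to sort....
-- #     if enum.count('Z'):
-- #         enum.insert(len(enum),enum.pop(enum.index('Z'))) #move Z (missing value) to be the last element
--     for x in range(0,len(dv)):
--         for i in range(0,len(enum)):
--             if dv[x] == enum[i]:
--                 rdv[x] = i;
--     return rdv
-- ===== SOURCE B (Python) =====
-- def col_to_list(dv):
--     uniq = set(dv)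
--     return [sum(u < v for u in uniq) for v in dv]
-- ===== Notes on version B (the rewrite author's own statement) =====
-- stated objective: alternative
-- what changed: B never sorts and builds no indexed list of unique values: it computes each element's rank directly as the count of distinct values strictly smaller than it (rank in sorted-unique order equals that count), replacing A's sort-then-linear-index-search with order-free comparison counting.
import Mathlib
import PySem

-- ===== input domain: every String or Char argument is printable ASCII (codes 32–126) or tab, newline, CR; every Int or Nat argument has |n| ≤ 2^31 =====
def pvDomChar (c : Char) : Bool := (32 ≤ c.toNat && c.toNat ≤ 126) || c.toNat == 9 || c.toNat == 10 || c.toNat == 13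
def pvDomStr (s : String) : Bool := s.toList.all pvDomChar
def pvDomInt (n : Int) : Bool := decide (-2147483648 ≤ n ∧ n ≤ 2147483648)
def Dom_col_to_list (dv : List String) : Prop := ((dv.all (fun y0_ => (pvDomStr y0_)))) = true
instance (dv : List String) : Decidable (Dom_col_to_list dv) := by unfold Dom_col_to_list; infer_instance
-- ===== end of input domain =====

-- B computes each element's rank as the count of distinct values strictly smaller
-- than it, with no sorting and no indexed unique list (an alternative algorithm).

-- ===== PORT A =====
-- rdv's cells start as the original strings (Sum.inl) and are overwritten with
-- indices (Sum.inr) exactly as Python's rdv[x] = i does; the final extraction's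
-- inl arm is unreachable because every dv[x] occurs in enum.
def col_to_list (dv : List String) : List Int :=
  let rdv : List (String ⊕ Int) := dv.map Sum.inl                    -- rdv = list(dv)
  let enum := PySem.List.sorted (PySem.Set.ofList dv) (fun s => s)   -- enum = list(set(dv)); enum.sort()
  let rdv :=
    (PySem.List.pyRange 0 (PySem.List.len dv)).foldl (fun rdv x =>      -- for x in range(0, len(dv)):
      (PySem.List.pyRange 0 (PySem.List.len enum)).foldl (fun rdv i =>  --   for i in range(0, len(enum)):
        if PySem.List.pyGetD dv x "" == PySem.List.pyGetD enum i "" then  -- if dv[x] == enum[i]: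
          PySem.List.pySetD rdv x (Sum.inr i)                           --     rdv[x] = i
        else rdv) rdv) rdv
  rdv.map (fun c => match c with | Sum.inl _ => 0 | Sum.inr i => i)  -- return rdv (every cell is an int)

-- ===== PORT B =====
def col_to_list_alt (dv : List String) : List Int :=
  let uniq := PySem.Set.ofList dv                                    -- uniq = set(dv)
  dv.map (fun v =>                                                   -- [ … for v in dv]
    (uniq.map (fun u => if u < v then (1 : Int) else 0)).sum)        -- sum(u < v for u in uniq)

-- ===== PRECONDITION & SPEC =====
def Spec_col_to_list (dv : List String) (out : List Int) : Prop := out = col_to_list_alt dv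
instance (dv : List String) (out : List Int) : Decidable (Spec_col_to_list dv out) := by unfold Spec_col_to_list; infer_instance

-- ===== CLAIM (what is proved, stated in full; the proofs are below) =====
def Claim_equal_col_to_list : Prop := ∀ (dv : List String), Dom_col_to_list dv → Spec_col_to_list dv (col_to_list dv)

-- ===== LEMMAS AND PROOFS =====

-- A's inner loop, seen over enumerate: on a duplicate-free list the last
-- (= only) match writes the index of v at position x; nothing happens if v is absent.
theorem inner_fold_set {γ : Type} (cs : List String) (v : String) (x : Int)
    (g : Int → γ) (hnd : cs.Nodup) :
    ∀ (s : Int) (l : List γ),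
      (PySem.List.enumerate cs s).foldl
        (fun l p => if v == p.2 then PySem.List.pySetD l x (g p.1) else l) l
      = if v ∈ cs then PySem.List.pySetD l x (g (s + (cs.idxOf v : Int))) else l := by
  induction cs with
  | nil => intro s l; simp [PySem.List.enumerate_nil]
  | cons c t ih =>
    intro s l
    rw [List.nodup_cons] at hnd
    rw [PySem.List.enumerate_cons, List.foldl_cons]
    by_cases hvc : v = c
    · subst hvc
      simp only [beq_self_eq_true, if_true]
      rw [ih hnd.2 (s+1)]
      simp [hnd.1, List.idxOf_cons_self]
    · have : (v == c) = false := by simp [hvc]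
      simp only [this, Bool.false_eq_true, if_false]
      rw [ih hnd.2 (s+1)]
      by_cases hvt : v ∈ t
      · simp only [hvt, List.mem_cons, hvc, false_or, if_true]
        congr 2
        rw [List.idxOf_cons_ne _ (by exact fun h => hvc h.symm)]
        push_cast; ring
      · simp [hvt, hvc]

-- Writing G k at every index k < n of l0 yields (range n).map G ++ the untouched tail.
theorem foldl_set_range {γ : Type} (G : Nat → γ) :
    ∀ (n : Nat) (l0 : List γ), n ≤ l0.length →
      (List.range n).foldl (fun l k => l.set k (G k)) l0
        = (List.range n).map G ++ l0.drop n := by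
  intro n
  induction n with
  | zero => simp
  | succ m ih =>
    intro l0 h
    rw [List.range_succ, List.foldl_append, List.foldl_cons, List.foldl_nil,
        ih l0 (by omega), List.map_append, List.map_cons, List.map_nil]
    rw [List.set_append_right _ _ (by simp)]
    have hd : l0.drop m = l0[m] :: l0.drop (m+1) :=
      List.drop_eq_getElem_cons (by omega)
    rw [hd, List.append_assoc]
    have hz : m - (List.map G (List.range m)).length = 0 := by simp
    rw [hz, List.set_cons_zero, List.cons_append, List.nil_append]

-- In a strictly increasing list, the index of v is the number of elements below v.
theorem idxOf_eq_countP_lt (l : List String) (hpl : l.Pairwise (· < ·))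
    (v : String) (hv : v ∈ l) :
    l.idxOf v = l.countP (fun u => decide (u < v)) := by
  induction l with
  | nil => cases hv
  | cons c t ih =>
    rw [List.pairwise_cons] at hpl
    by_cases hvc : v = c
    · subst hvc
      have h0 : t.countP (fun u => decide (u < v)) = 0 := by
        rw [List.countP_eq_zero]
        intro u hu
        simpa using not_lt_of_gt (hpl.1 u hu)
      rw [List.idxOf_cons_self, List.countP_cons, h0]
      simp
    · have hvt : v ∈ t := by
        rcases List.mem_cons.mp hv with h | h
        · exact absurd h hvc
        · exact h
      rw [List.idxOf_cons_ne _ (fun h => hvc h.symm), List.countP_cons,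
          ih hpl.2 hvt]
      have : c < v := hpl.1 v hvt
      simp [this]

-- A 0/1-sum over a list is a count.
theorem sum_map_lt_eq_countP (l : List String) (v : String) :
    (l.map (fun u => if u < v then (1 : Int) else 0)).sum
      = (l.countP (fun u => decide (u < v)) : Int) := by
  induction l with
  | nil => simp
  | cons c t ih =>
    rw [List.map_cons, List.sum_cons, ih, List.countP_cons]
    by_cases h : c < v
    · simp [h]; omega
    · simp [h]

theorem col_to_list_eq_alt (dv : List String) : col_to_list dv = col_to_list_alt dv := by
  unfold col_to_list col_to_list_alt
  dsimp only
  set enum := PySem.List.sorted (PySem.Set.ofList dv) (fun s => s) with henum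
  have hpl : enum.Pairwise (· < ·) := PySem.List.sorted_ofList_pairwise_lt dv
  have hnd : enum.Nodup := hpl.imp (fun h => ne_of_lt h)
  have hmem : ∀ v ∈ dv, v ∈ enum := by
    intro v hv
    rw [henum, PySem.List.mem_sorted, PySem.Set.mem_ofList]
    exact hv
  -- rewrite the outer loop body: each step writes the rank at position x
  have hcongr := PySem.List.foldl_congr_mem (PySem.List.pyRange 0 (PySem.List.len dv))
    (fun rdv x =>
      (PySem.List.pyRange 0 (PySem.List.len enum)).foldl (fun rdv i =>
        if PySem.List.pyGetD dv x "" == PySem.List.pyGetD enum i "" then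
          PySem.List.pySetD rdv x (Sum.inr i)
        else rdv) rdv)
    (fun rdv x => PySem.List.pySetD rdv x
      (Sum.inr ((enum.idxOf (PySem.List.pyGetD dv x "") : Int))))
    (dv.map Sum.inl)
    (by
      intro acc x hx
      dsimp only
      have hx' := PySem.List.mem_pyRange_one.mp hx
      have hvmem : PySem.List.pyGetD dv x "" ∈ enum := by
        apply hmem
        exact PySem.List.pyGetD_mem dv "" (by simp only [PySem.Raise.InRange]; simp at hx'; omega)
      have he := PySem.List.enumerate_eq_map_pyRange enum ""
      have : (PySem.List.pyRange 0 (PySem.List.len enum)).foldl (fun rdv i =>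
          if PySem.List.pyGetD dv x "" == PySem.List.pyGetD enum i "" then
            PySem.List.pySetD rdv x (Sum.inr i)
          else rdv) acc
          = (PySem.List.enumerate enum 0).foldl
            (fun l p => if PySem.List.pyGetD dv x "" == p.2 then
              PySem.List.pySetD l x (Sum.inr p.1) else l) acc := by
        rw [he, List.foldl_map]
      rw [this, inner_fold_set enum _ x (fun i => Sum.inr i) hnd 0 acc]
      simp [hvmem])
  rw [hcongr]
  -- turn the pyRange fold into a range fold of List.set
  have hr : PySem.List.pyRange 0 (PySem.List.len dv)
      = (List.range dv.length).map (fun (k : Nat) => (k : Int)) := by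
    rw [PySem.List.pyRange_one,
        show ((PySem.List.len dv : Int) - 0).toNat = dv.length by
          simp [PySem.List.len]]
    exact List.map_congr_left (fun k _ => by simp)
  rw [hr, List.foldl_map]
  simp only [PySem.List.pySetD_natCast]
  rw [foldl_set_range
    (fun k => (Sum.inr ((enum.idxOf (PySem.List.pyGetD dv (k : Int) "") : Int)) : String ⊕ Int))
    dv.length (dv.map Sum.inl) (by simp)]
  rw [show (dv.map Sum.inl).drop dv.length = ([] : List (String ⊕ Int)) by simp]
  rw [List.append_nil]
  -- compare elementwise
  apply List.ext_getElem
  · simp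
  · intro k hk1 hk2
    have hkd : k < dv.length := by simpa using hk1
    simp only [List.getElem_map, List.getElem_range]
    have hget : PySem.List.pyGetD dv (k : Int) "" = dv[k]'hkd := by
      rw [PySem.List.pyGetD_eq_getElem dv "" (by positivity) (by exact_mod_cast hkd)]
      simp
    rw [hget, sum_map_lt_eq_countP]
    have hperm : enum.Perm (PySem.Set.ofList dv) :=
      PySem.List.sorted_perm (PySem.Set.ofList dv) (fun s => s) false
    rw [← hperm.countP_eq,
        ← idxOf_eq_countP_lt enum hpl (dv[k]'hkd) (hmem _ (List.getElem_mem hkd))]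

-- ===== VERDICT (by name: the statement is the Claim_ definition above) =====
theorem col_to_list_spec : Claim_equal_col_to_list := by
  intro dv _hdom
  unfold Spec_col_to_list
  exact col_to_list_eq_alt dv
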